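-- pv_equiv track=rewrite | github.com/xogns3725/codeTest | 홀수 vs 짝수.py | solution
-- ===== SOURCE A (Python) =====
-- def solution(num_list):
--     answer = 0
--     odd, even = 0, 0
--     for i in range(len(num_list)):
--         if i%2==0:
--             even += num_list[i]
--         else:
--             odd += num_list[i]
--     answer = max(even, odd)
--     return answer
-- ===== SOURCE B (Python) =====
-- def solution(num_list):
--     even = sum(num_list[::2])
--     odd = sum(num_list[1::2])
--     return max(even, odd)
-- ===== Notes on version B (the rewrite author's own statement) =====
-- stated objective: idiomatic
-- what changed: Replaces the indexed loop with a parity branch and two accumulators by two strided slices num_list[::2] / num_list[1::2], summed and compared with max.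
import Mathlib
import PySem

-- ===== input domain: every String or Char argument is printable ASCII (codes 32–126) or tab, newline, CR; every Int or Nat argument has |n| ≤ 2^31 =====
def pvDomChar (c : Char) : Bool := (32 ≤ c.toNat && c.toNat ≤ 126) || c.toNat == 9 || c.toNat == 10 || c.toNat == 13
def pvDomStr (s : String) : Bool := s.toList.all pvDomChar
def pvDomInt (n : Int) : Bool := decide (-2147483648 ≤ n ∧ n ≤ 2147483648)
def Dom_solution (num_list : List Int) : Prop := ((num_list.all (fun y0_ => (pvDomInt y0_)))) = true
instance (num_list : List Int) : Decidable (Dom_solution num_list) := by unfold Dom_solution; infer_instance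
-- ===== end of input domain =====

-- B replaces A's indexed loop with parity branch by summing the two strided slices [::2] and [1::2] (idiomatic; same cost).


-- ===== PORT A =====
-- loop over range(len(num_list)) carrying (odd, even); num_list[i] is in range, so pyGetD is exact
def solution (num_list : List Int) : Int :=
  let p := (PySem.List.pyRange 0 (num_list.length : Int) 1).foldl
    (fun (st : Int × Int) i =>
      if PySem.Int.mod i 2 = 0 then (st.1, st.2 + PySem.List.pyGetD num_list i 0)
      else (st.1 + PySem.List.pyGetD num_list i 0, st.2))
    (0, 0)
  max p.2 p.1

-- ===== PORT B =====
-- the two slices have step 2 ≠ 0, so slice? always returns some; getD [] is exact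
def solution_alt (num_list : List Int) : Int :=
  let even := ((PySem.List.slice? num_list none none 2).getD []).sum
  let odd := ((PySem.List.slice? num_list (some 1) none 2).getD []).sum
  max even odd

-- ===== PRECONDITION & SPEC =====
def Spec_solution (num_list : List Int) (out : Int) : Prop := out = solution_alt num_list
instance (num_list : List Int) (out : Int) : Decidable (Spec_solution num_list out) := by unfold Spec_solution; infer_instance

-- ===== CLAIM (what is proved, stated in full; the proofs are below) =====
def Claim_equal_solution : Prop := ∀ (num_list : List Int), Dom_solution num_list → Spec_solution num_list (solution num_list)

-- ===== LEMMAS AND PROOFS =====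

def psum : Bool → List Int → Int
  | _, [] => 0
  | true, a :: t => a + psum false t
  | false, _ :: t => psum true t

theorem psum_append_single (l : List Int) (x : Int) :
    ∀ b, psum b (l ++ [x]) = psum b l + (if (decide (l.length % 2 = 0)) = b then x else 0) := by
  induction l with
  | nil => intro b; cases b <;> simp [psum]
  | cons a t ih =>
    intro b
    rcases Nat.mod_two_eq_zero_or_one t.length with h | h <;>
    all_goals cases b <;> simp [psum, ih, h] <;> (try split_ifs) <;> omega

theorem loopA (xs : List Int) : ∀ (n : Nat), n ≤ xs.length → ∀ (o e : Int),
    (PySem.List.pyRange 0 (n : Int) 1).foldl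
      (fun (st : Int × Int) i =>
        if PySem.Int.mod i 2 = 0 then (st.1, st.2 + PySem.List.pyGetD xs i 0)
        else (st.1 + PySem.List.pyGetD xs i 0, st.2))
      (o, e)
      = (o + psum false (xs.take n), e + psum true (xs.take n)) := by
  intro n
  induction n with
  | zero => intro _ o e; simp [PySem.List.pyRange_one_eq_nil, psum]
  | succ n ih =>
    intro h o e
    have hn : n < xs.length := by omega
    have hcast : ((n + 1 : Nat) : Int) = (n : Int) + 1 := by push_cast; ring
    rw [hcast, PySem.List.pyRange_one_succ_right (Int.natCast_nonneg n),
      List.foldl_append, ih (by omega) o e]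
    have hget : PySem.List.pyGetD xs (n : Int) 0 = xs[n] := by
      rw [PySem.List.pyGetD_eq_getElem xs 0 (Int.natCast_nonneg n) (by exact_mod_cast hn)]; simp
    have htake : xs.take (n + 1) = xs.take n ++ [xs[n]] := by
      rw [List.take_add_one]; simp [List.getElem?_eq_getElem hn]
    have hlen : (xs.take n).length = n := by simp; omega
    have hdvd : ((2 : Int) ∣ (n : Int)) ↔ n % 2 = 0 := by omega
    simp only [List.foldl_cons, List.foldl_nil, hget, htake,
      psum_append_single, hlen]
    rcases Nat.mod_two_eq_zero_or_one n with hp | hp <;>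
      simp [hdvd, hp] <;> ring

theorem slice2_evens (xs : List Int) :
    PySem.List.slice? xs none none 2
      = some ((List.range ((xs.length + 1) / 2)).filterMap (fun k => xs[2 * k]?)) := by
  simp only [PySem.List.slice?, PySem.List.sliceIndices]
  norm_num
  have hc : (if 0 < xs.length then (((xs.length : Int) + 2 - 1) / 2).toNat else 0)
      = (xs.length + 1) / 2 := by
    split_ifs with h <;> omega
  rw [hc]
  congr 1

theorem slice2_odds (xs : List Int) :
    PySem.List.slice? xs (some 1) none 2
      = some ((List.range (xs.length / 2)).filterMap (fun k => xs[2 * k + 1]?)) := by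
  simp only [PySem.List.slice?, PySem.List.sliceIndices]
  norm_num
  by_cases h : xs.length = 0
  · simp [h]
  · have hmin : min 1 (xs.length : Int) = 1 := by omega
    rw [hmin]
    have hc : (if 1 < xs.length then (((xs.length : Int) - 1 + 2 - 1) / 2).toNat else 0)
        = xs.length / 2 := by split_ifs <;> omega
    rw [hc]
    congr 1
    funext k
    congr 1
    omega

theorem sum_fm_evens : ∀ xs : List Int,
    ((List.range ((xs.length + 1) / 2)).filterMap (fun k => xs[2 * k]?)).sum = psum true xs
  | [] => by simp [psum]
  | [a] => by simp [psum, List.range_succ]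
  | a :: b :: t => by
    have h2 : (a :: b :: t).length = t.length + 2 := by simp
    have h3 : ((a :: b :: t).length + 1) / 2 = (t.length + 1) / 2 + 1 := by simp; omega
    rw [h3, List.range_succ_eq_map, List.filterMap_cons, List.filterMap_map]
    have : ((fun k => (a :: b :: t)[2 * k]?) ∘ Nat.succ) = (fun k => t[2 * k]?) := by
      funext k
      have : 2 * Nat.succ k = (2 * k) + 1 + 1 := by omega
      simp [this]
    rw [this]
    simp [psum, sum_fm_evens t]

theorem sum_fm_odds (xs : List Int) :
    ((List.range (xs.length / 2)).filterMap (fun k => xs[2 * k + 1]?)).sum = psum false xs := by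
  cases xs with
  | nil => simp [psum]
  | cons a t =>
    have h : (a :: t).length / 2 = (t.length + 1) / 2 := by simp
    rw [h]
    have : (fun k => (a :: t)[2 * k + 1]?) = (fun k => t[2 * k]?) := by
      funext k; simp
    rw [this, sum_fm_evens t]; simp [psum]

-- ===== VERDICT (by name: the statement is the Claim_ definition above) =====
theorem solution_spec : Claim_equal_solution := by
  intro xs _
  unfold Spec_solution solution solution_alt
  rw [loopA xs xs.length le_rfl 0 0, slice2_evens, slice2_odds]
  simp [sum_fm_evens, sum_fm_odds]
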